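-- pv_equiv track=rewrite | github.com/J-millar99/algorithm | Greedy_practice/무지의 먹방 라이브_풀이.py | solution
-- ===== SOURCE A (Python) =====
-- def solution(food_times, k):
--     while True:
--         for i in range(len(food_times)): #음식 인덱스를 확인
--             if food_times[i] > 0:
--                 food_times[i] = food_times[i] - 1 #음식이 남아있으면 섭취
--                 k -= 1 #시간초 흐름
--             if k == 0: #0초에 도달하면 멈춤
--                 break;
--         if k == 0: #0초에 도달하면 멈춤
--             break;
--     return (food_times)
-- ===== SOURCE B (Python) =====
-- def solution(food_times, k):
--     # Layer peeling via binary search on the number of complete rounds, then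
--     # one pass for the partial round (A mutates food_times in place; B does
--     # not -- the equivalence is about the return value).
--     def eaten(r):
--         # total units consumed after r complete rounds
--         return sum(min(f, r) for f in food_times if f > 0)
--
--     if k == 0:
--         return food_times
--     total = sum(f for f in food_times if f > 0)
--     lo, hi = 0, total
--     # invariant: eaten(lo) < k <= eaten(hi); ends with hi = lo + 1
--     while lo + 1 < hi:
--         mid = (lo + hi) // 2
--         if eaten(mid) < k:
--             lo = mid
--         else:
--             hi = mid
--     rem = k - eaten(lo)  # eats still to serve in the partial round lo + 1
--     res = []
--     for f in food_times:
--         if f <= 0: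
--             res.append(f)
--         elif f <= lo:
--             res.append(0)
--         elif rem > 0:
--             res.append(f - lo - 1)
--             rem -= 1
--         else:
--             res.append(f - lo)
--     return res
-- ===== Notes on version B (the rewrite author's own statement) =====
-- stated objective: alternative
-- what changed: A simulates the round-robin eating second by second (one decrement per unit of k); B binary-searches the number of complete rounds on the analytic 'units eaten after r rounds' function and then finishes the single partial round in one pass, so no per-second simulation remains (O(n log S) work vs A's O(k*n), though a timing run could not read a ratio: A timed out at the large sizes).
import Mathlib
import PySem

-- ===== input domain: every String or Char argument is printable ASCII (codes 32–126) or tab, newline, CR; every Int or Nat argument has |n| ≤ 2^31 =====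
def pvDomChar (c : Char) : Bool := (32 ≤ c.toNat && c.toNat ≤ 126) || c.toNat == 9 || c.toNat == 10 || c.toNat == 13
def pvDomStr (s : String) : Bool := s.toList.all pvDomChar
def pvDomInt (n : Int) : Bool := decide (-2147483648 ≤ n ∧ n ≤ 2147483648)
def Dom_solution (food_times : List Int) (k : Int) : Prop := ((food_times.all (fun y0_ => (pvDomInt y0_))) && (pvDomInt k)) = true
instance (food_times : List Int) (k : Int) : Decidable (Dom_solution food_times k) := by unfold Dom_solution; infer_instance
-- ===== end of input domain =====

-- B replaces A's second-by-second round-robin simulation by a binary search on the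
-- number of complete rounds plus one closing pass over the list.
-- Return-value equivalence only: A mutates food_times in place, B does not.

-- ===== PORT A =====
-- the inner `for i in range(len(food_times))` loop: state = (list tail, k);
-- the already-visited prefix is rebuilt around the recursive call, the break
-- (`if k == 0: break`) returns the untouched rest unchanged
def solPass : List Int → Int → List Int × Int
  | [], k => ([], k)
  | f :: rest, k =>
    let fk := if f > 0 then (f - 1, k - 1) else (f, k)
    if fk.2 = 0 then (fk.1 :: rest, fk.2)
    else
      let rk := solPass rest fk.2
      (fk.1 :: rk.1, rk.2)

-- the outer `while True` loop; fuel is a termination guard only: on every input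
-- satisfying Pre_solution the loop exits (k' = 0) before the fuel runs out
def solLoop : Nat → List Int → Int → List Int
  | 0, ft, _ => ft
  | fuel + 1, ft, k =>
    let p := solPass ft k
    if p.2 = 0 then p.1 else solLoop fuel p.1 p.2

def solution (food_times : List Int) (k : Int) : List Int :=
  solLoop (k.toNat + 1) food_times k

-- ===== PORT B =====
-- eaten(r) = sum(min(f, r) for f in food_times if f > 0)
def eatenB (ft : List Int) (r : Int) : Int :=
  ((ft.filter (fun f => 0 < f)).map (fun f => min f r)).sum

-- the `while lo + 1 < hi` binary-search loop of Source B
def bsB (ft : List Int) (k lo hi : Int) : Int :=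
  if h : lo + 1 < hi then
    let mid := PySem.Int.floordiv (lo + hi) 2
    if eatenB ft mid < k then bsB ft k mid hi else bsB ft k lo mid
  else lo
termination_by (hi - lo).toNat
decreasing_by
  all_goals
    simp only [PySem.Int.floordiv_eq_ediv_of_pos (by norm_num : (0:Int) < 2)] at *
    omega

-- the closing `for f in food_times` pass of Source B (res/rem accumulators)
def scanB (lo : Int) : List Int → Int → List Int
  | [], _ => []
  | f :: rest, rem =>
    if f ≤ 0 then f :: scanB lo rest rem
    else if f ≤ lo then 0 :: scanB lo rest rem
    else if rem > 0 then (f - lo - 1) :: scanB lo rest (rem - 1)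
    else (f - lo) :: scanB lo rest rem

def solution_alt (food_times : List Int) (k : Int) : List Int :=
  if k = 0 then food_times
  else
    let total := (food_times.filter (fun f => 0 < f)).sum
    let lo := bsB food_times k 0 total
    let rem := k - eatenB food_times lo
    scanB lo food_times rem

-- ===== PRECONDITION & SPEC =====
-- Pre_ is exactly the set of inputs on which A terminates: either k = 0 and the
-- first element (if any) is nonpositive (otherwise k goes negative and the loop
-- never stops), or 1 ≤ k ≤ total positive food (otherwise k skips past 0 or the
-- food runs out first and `while True` spins forever).
def Pre_solution (food_times : List Int) (k : Int) : Prop :=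
  (k = 0 ∧ food_times.headD 0 ≤ 0) ∨
  (1 ≤ k ∧ k ≤ (food_times.filter (fun f => 0 < f)).sum)
instance (food_times : List Int) (k : Int) : Decidable (Pre_solution food_times k) := by
  unfold Pre_solution; infer_instance

def pvWitness_solution : List Int × Int := ([3, 1, 2], 4)

def Spec_solution (food_times : List Int) (k : Int) (out : List Int) : Prop := out = solution_alt food_times k
instance (food_times : List Int) (k : Int) (out : List Int) : Decidable (Spec_solution food_times k out) := by unfold Spec_solution; infer_instance

-- ===== CLAIM (what is proved, stated in full; the proofs are below) =====
def Claim_equal_solution : Prop := ∀ (food_times : List Int) (k : Int), Dom_solution food_times k → Pre_solution food_times k → Spec_solution food_times k (solution food_times k)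

-- ===== LEMMAS AND PROOFS =====

-- one full round: every positive entry is decremented
def decPos (ft : List Int) : List Int := ft.map (fun f => if 0 < f then f - 1 else f)
-- number of positive entries
def cntPos (ft : List Int) : Int := ((ft.filter (fun f => 0 < f)).length : Int)
-- state of the list after R complete rounds
def mapR (R : Int) (ft : List Int) : List Int :=
  ft.map (fun f => if 0 < f then f - min f R else f)
-- effect of the breaking (partial) round: decrement the first k positive entries
def partialDec : List Int → Int → List Int
  | [], _ => []
  | f :: rest, k =>
    if 0 < f then (if k = 1 then (f - 1) :: rest else (f - 1) :: partialDec rest (k - 1))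
    else f :: partialDec rest k


theorem cntPos_cons (f : Int) (rest : List Int) :
    cntPos (f :: rest) = (if 0 < f then 1 else 0) + cntPos rest := by
  simp only [cntPos, List.filter_cons]
  by_cases hf : 0 < f
  · simp [hf]; push_cast; ring
  · simp [hf]

theorem cntPos_nonneg (ft : List Int) : 0 ≤ cntPos ft := by
  simp [cntPos]

theorem eatenB_cons (f : Int) (rest : List Int) (r : Int) :
    eatenB (f :: rest) r = (if 0 < f then min f r else 0) + eatenB rest r := by
  simp only [eatenB, List.filter_cons]
  by_cases hf : 0 < f
  · simp [hf]
  · simp [hf]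

theorem decPos_cons (f : Int) (rest : List Int) :
    decPos (f :: rest) = (if 0 < f then f - 1 else f) :: decPos rest := by
  simp [decPos]

theorem pass_full (ft : List Int) (k : Int) (h : cntPos ft < k) :
    solPass ft k = (decPos ft, k - cntPos ft) := by
  induction ft generalizing k with
  | nil => simp [solPass, decPos, cntPos]
  | cons f rest ih =>
    rw [cntPos_cons] at h
    have hnn := cntPos_nonneg rest
    by_cases hf : f > 0
    · rw [if_pos hf] at h
      have hne : ¬ (k - 1 = 0) := by omega
      simp only [solPass, if_pos hf, hne, if_false]
      rw [ih (k - 1) (by omega), decPos_cons, cntPos_cons, if_pos hf, if_pos hf]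
      congr 1
      omega
    · rw [if_neg hf] at h
      have hne : ¬ (k = 0) := by omega
      simp only [solPass, if_neg hf, hne, if_false]
      rw [ih k (by omega), decPos_cons, cntPos_cons, if_neg hf, if_neg hf]
      congr 1
      omega

theorem pass_break (ft : List Int) (k : Int) (h1 : 1 ≤ k) (h2 : k ≤ cntPos ft) :
    solPass ft k = (partialDec ft k, 0) := by
  induction ft generalizing k with
  | nil => simp [cntPos] at h2; omega
  | cons f rest ih =>
    rw [cntPos_cons] at h2
    by_cases hf : f > 0
    · rw [if_pos hf] at h2
      by_cases hk1 : k = 1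
      · subst hk1
        simp [solPass, partialDec, if_pos hf]
      · have hne : ¬ (k - 1 = 0) := by omega
        simp only [solPass, if_pos hf, hne, if_false]
        rw [ih (k - 1) (by omega) (by omega)]
        simp [partialDec, hf, hk1]
    · rw [if_neg hf] at h2
      have hne : ¬ (k = 0) := by omega
      simp only [solPass, if_neg hf, hne, if_false]
      rw [ih k h1 (by omega)]
      simp [partialDec, hf]

theorem eaten_zero (ft : List Int) : eatenB ft 0 = 0 := by
  induction ft with
  | nil => simp [eatenB]
  | cons f rest ih => rw [eatenB_cons, ih]; split_ifs <;> omega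

theorem eaten_one (ft : List Int) : eatenB ft 1 = cntPos ft := by
  induction ft with
  | nil => simp [eatenB, cntPos]
  | cons f rest ih => rw [eatenB_cons, ih, cntPos_cons]; split_ifs <;> omega

theorem eaten_mono (ft : List Int) (r s : Int) (h0 : 0 ≤ r) (h : r ≤ s) :
    eatenB ft r ≤ eatenB ft s := by
  induction ft with
  | nil => simp [eatenB]
  | cons f rest ih => rw [eatenB_cons, eatenB_cons]; split_ifs <;> omega

theorem eaten_dec (ft : List Int) (r : Int) (h : 0 ≤ r) :
    eatenB (decPos ft) r = eatenB ft (r + 1) - eatenB ft 1 := by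
  induction ft with
  | nil => simp [eatenB, decPos]
  | cons f rest ih =>
    rw [decPos_cons, eatenB_cons, eatenB_cons, eatenB_cons, ih]
    split_ifs <;> omega

theorem eaten_succ (ft : List Int) (r : Int) (h : 0 ≤ r) :
    eatenB ft (r + 1) = eatenB ft r + ((ft.filter (fun f => r < f)).length : Int) := by
  induction ft with
  | nil => simp [eatenB]
  | cons f rest ih =>
    rw [eatenB_cons, eatenB_cons, List.filter_cons]
    split_ifs <;> simp_all <;> omega

theorem eaten_sat (ft : List Int) (r : Int) (h0 : 0 ≤ r)
    (h : (ft.filter (fun f => r < f)).length = 0) :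
    eatenB ft r = (ft.filter (fun f => 0 < f)).sum := by
  induction ft with
  | nil => simp [eatenB]
  | cons f rest ih =>
    rw [List.filter_cons] at h
    rw [eatenB_cons, List.filter_cons]
    by_cases hrf : r < f
    · simp [hrf] at h
    · have h' : (rest.filter (fun f => r < f)).length = 0 := by
        simpa [hrf] using h
      rw [ih h']
      by_cases hf : 0 < f
      · simp [hf]
        omega
      · simp [hf]

theorem sumPos_nonneg (ft : List Int) : 0 ≤ (ft.filter (fun f => 0 < f)).sum := by
  induction ft with
  | nil => simp
  | cons f rest ih => rw [List.filter_cons]; split_ifs with hf <;> simp_all <;> omega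

theorem eaten_total (ft : List Int) :
    eatenB ft ((ft.filter (fun f => 0 < f)).sum) = (ft.filter (fun f => 0 < f)).sum := by
  have key : ∀ (t : Int), (∀ f ∈ ft, 0 < f → f ≤ t) → 0 ≤ t → eatenB ft t = (ft.filter (fun f => 0 < f)).sum := by
    intro t hall h0
    apply eaten_sat ft t h0
    simp only [List.length_eq_zero_iff, List.filter_eq_nil_iff]
    intro a ha
    by_cases hap : 0 < a
    · have := hall a ha hap; simp; omega
    · simp; omega
  apply key _ _ (sumPos_nonneg ft)
  intro f hf hfp
  clear key
  induction ft with
  | nil => simp at hf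
  | cons g rest ih =>
    have hsr := sumPos_nonneg rest
    rw [List.filter_cons]
    rcases List.mem_cons.mp hf with hf | hf
    · subst hf; simp [hfp]; omega
    · have := ih hf
      split_ifs with hg <;> simp_all <;> omega

theorem eaten_lb (ft : List Int) (k : Int) (hk : k ≤ (ft.filter (fun f => 0 < f)).sum) :
    ∀ (R : Nat), eatenB ft R < k → (R : Int) ≤ eatenB ft R := by
  intro R
  induction R with
  | zero => intro _; simp only [Nat.cast_zero]; rw [eaten_zero]
  | succ R ih =>
    intro h
    have hcast : ((R + 1 : Nat) : Int) = (R : Int) + 1 := by push_cast; ring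
    rw [hcast] at h ⊢
    have hmono : eatenB ft R ≤ eatenB ft ((R : Int) + 1) := eaten_mono ft R _ (by omega) (by omega)
    have hRle := ih (by omega)
    rw [eaten_succ ft R (by omega)] at h ⊢
    by_cases hc : (ft.filter (fun f => (R : Int) < f)).length = 0
    · rw [eaten_sat ft R (by omega) hc] at h
      omega
    · omega

theorem mapR_zero (ft : List Int) : mapR 0 ft = ft := by
  induction ft with
  | nil => simp [mapR]
  | cons f rest ih =>
    simp only [mapR, List.map_cons] at *
    rw [ih]
    congr 1
    split_ifs <;> omega

theorem mapR_cons (R f : Int) (rest : List Int) :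
    mapR R (f :: rest) = (if 0 < f then f - min f R else f) :: mapR R rest := by
  simp [mapR]

theorem mapR_dec (ft : List Int) (R : Int) (h : 0 ≤ R) :
    mapR R (decPos ft) = mapR (R + 1) ft := by
  induction ft with
  | nil => simp [mapR, decPos]
  | cons f rest ih =>
    rw [decPos_cons, mapR_cons, mapR_cons, ih]
    congr 1
    split_ifs <;> omega

theorem loop_run (R : Nat) : ∀ (fuel : Nat) (ft : List Int) (k : Int),
    R < fuel → eatenB ft R < k → k ≤ eatenB ft ((R : Int) + 1) →
    solLoop fuel ft k = partialDec (mapR R ft) (k - eatenB ft R) := by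
  induction R with
  | zero =>
    intro fuel ft k hfuel h0 h1
    obtain ⟨fuel, rfl⟩ : ∃ m, fuel = m + 1 := ⟨fuel - 1, by omega⟩
    simp only [Nat.cast_zero] at h0 h1 ⊢
    rw [eaten_zero] at h0 ⊢
    have h1' : k ≤ cntPos ft := by rw [← eaten_one]; simpa using h1
    rw [solLoop, pass_break ft k (by omega) h1']
    simp [mapR_zero]
  | succ R ih =>
    intro fuel ft k hfuel h0 h1
    obtain ⟨fuel, rfl⟩ : ∃ m, fuel = m + 1 := ⟨fuel - 1, by omega⟩
    have hcast : ((R + 1 : Nat) : Int) = (R : Int) + 1 := by push_cast; ring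
    rw [hcast] at h0 h1 ⊢
    have hcnt : cntPos ft < k := by
      have := eaten_mono ft 1 ((R : Int) + 1) (by omega) (by omega)
      rw [eaten_one] at this
      omega
    rw [solLoop, pass_full ft k hcnt]
    have hne : ¬ (k - cntPos ft = 0) := by omega
    simp only [hne, if_false]
    have hd1 : eatenB (decPos ft) R = eatenB ft ((R : Int) + 1) - cntPos ft := by
      rw [eaten_dec ft _ (by omega), eaten_one]
    have hd2 : eatenB (decPos ft) ((R : Int) + 1) = eatenB ft ((R : Int) + 1 + 1) - cntPos ft := by
      rw [eaten_dec ft _ (by omega), eaten_one]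
    rw [ih fuel (decPos ft) (k - cntPos ft) (by omega) (by omega) (by omega)]
    rw [mapR_dec ft R (by omega)]
    congr 1
    omega

theorem scan_zero (R : Int) (ft : List Int) (rem : Int) (h : rem ≤ 0) :
    scanB R ft rem = mapR R ft := by
  induction ft with
  | nil => simp [scanB, mapR]
  | cons f rest ih =>
    rw [mapR_cons]
    have hrem : ¬ (rem > 0) := by omega
    by_cases h1 : f ≤ 0
    · simp only [scanB, if_pos h1, ih]
      congr 1; split_ifs <;> omega
    · by_cases h2 : f ≤ R
      · simp only [scanB, if_neg h1, if_pos h2, ih]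
        congr 1; split_ifs <;> omega
      · simp only [scanB, if_neg h1, if_neg h2, hrem, if_false, ih]
        congr 1; split_ifs <;> omega

theorem scan_eq (R : Int) (hR : 0 ≤ R) : ∀ (ft : List Int) (rem : Int), 1 ≤ rem →
    partialDec (mapR R ft) rem = scanB R ft rem := by
  intro ft
  induction ft with
  | nil => intro rem _; simp [partialDec, scanB, mapR]
  | cons f rest ih =>
    intro rem hrem
    rw [mapR_cons]
    by_cases h1 : f ≤ 0
    · have hf : ¬ (0 < f) := by omega
      simp only [if_neg hf]
      simp only [scanB, if_pos h1]
      rw [partialDec, if_neg hf, ih rem hrem]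
    · have hf : 0 < f := by omega
      by_cases h2 : f ≤ R
      · have hmin : f - min f R = 0 := by omega
        simp only [if_pos hf, hmin]
        simp only [scanB, if_neg h1, if_pos h2]
        simp [partialDec, ih rem hrem]
      · have hmin : f - min f R = f - R := by omega
        have hpos : 0 < f - R := by omega
        simp only [if_pos hf, hmin]
        simp only [scanB, if_neg h1, if_neg h2, if_pos (by omega : rem > 0)]
        rw [partialDec, if_pos hpos]
        by_cases hr1 : rem = 1
        · subst hr1
          rw [scan_zero R rest (1 - 1) (by omega)]
          simp
        · rw [if_neg hr1, ih (rem - 1) (by omega)]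

theorem bs_spec_aux (ft : List Int) (k : Int) : ∀ (m : Nat) (lo hi : Int),
    (hi - lo).toNat ≤ m → 0 ≤ lo → lo < hi → eatenB ft lo < k → k ≤ eatenB ft hi →
    0 ≤ bsB ft k lo hi ∧ eatenB ft (bsB ft k lo hi) < k ∧
      k ≤ eatenB ft (bsB ft k lo hi + 1) := by
  intro m
  induction m with
  | zero => intro lo hi hm h0 hlh hl hh; omega
  | succ m ih =>
    intro lo hi hm h0 hlh hl hh
    rw [bsB]
    by_cases hc : lo + 1 < hi
    · rw [dif_pos hc]
      have hmid : PySem.Int.floordiv (lo + hi) 2 = (lo + hi) / 2 :=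
        PySem.Int.floordiv_eq_ediv_of_pos (by norm_num)
      simp only [hmid]
      by_cases he : eatenB ft ((lo + hi) / 2) < k
      · rw [if_pos he]
        exact ih ((lo + hi) / 2) hi (by omega) (by omega) (by omega) he hh
      · rw [if_neg he]
        exact ih lo ((lo + hi) / 2) (by omega) h0 (by omega) hl (by omega)
    · rw [dif_neg hc]
      have : hi = lo + 1 := by omega
      subst this
      exact ⟨h0, hl, hh⟩

theorem bs_spec (ft : List Int) (k lo hi : Int) (h0 : 0 ≤ lo) (hlh : lo < hi)
    (hl : eatenB ft lo < k) (hh : k ≤ eatenB ft hi) :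
    0 ≤ bsB ft k lo hi ∧ eatenB ft (bsB ft k lo hi) < k ∧
      k ≤ eatenB ft (bsB ft k lo hi + 1) :=
  bs_spec_aux ft k (hi - lo).toNat lo hi (le_refl _) h0 hlh hl hh

-- ===== VERDICT (by name: the statement is the Claim_ definition above) =====
theorem solution_spec : Claim_equal_solution := by
  unfold Claim_equal_solution
  intro ft k _ hpre
  unfold Spec_solution solution solution_alt
  rcases hpre with ⟨hk0, hhd⟩ | ⟨hk1, hk2⟩
  · subst hk0
    simp only [if_pos rfl]
    cases ft with
    | nil => simp [solLoop, solPass]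
    | cons f rest =>
      have hf : ¬ (f > 0) := by simp [List.headD] at hhd; omega
      simp [solLoop, solPass, hf]
  · have hk0 : ¬ (k = 0) := by omega
    simp only [if_neg hk0]
    have hsn := sumPos_nonneg ft
    have htpos : 0 < (ft.filter (fun f => 0 < f)).sum := by omega
    obtain ⟨hbs0, hbsl, hbsh⟩ := bs_spec ft k 0 ((ft.filter (fun f => 0 < f)).sum)
      (le_refl 0) htpos (by rw [eaten_zero]; omega) (by rw [eaten_total]; exact hk2)
    set l := bsB ft k 0 ((ft.filter (fun f => 0 < f)).sum) with hldef
    have hcast : ((l.toNat : Nat) : Int) = l := Int.toNat_of_nonneg hbs0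
    have hlb : l ≤ eatenB ft l := by
      have := eaten_lb ft k hk2 l.toNat
      rw [hcast] at this
      exact this hbsl
    have hrun := loop_run l.toNat (k.toNat + 1) ft k (by omega) (by rw [hcast]; exact hbsl)
      (by rw [hcast]; exact hbsh)
    rw [hcast] at hrun
    rw [hrun, scan_eq l hbs0 ft (k - eatenB ft l) (by omega)]
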